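-- pv_equiv track=rewrite | github.com/viivan/SCEM | Algorithms/BTM-RB/btm_vn/cluster/kmeans.py | cal_density
-- ===== SOURCE A (Python) =====
-- import math
--
-- def cal_distance(vec1, vec2):
--     # 直接计算欧式距离的平方
--     d_sum = sum([math.pow(vec1[i] - vec2[i], 2) for i in range(len(vec1))])
--     return d_sum
--
-- def cal_density(threshold, matrix):
--     # 计算dpc中元素局部密度,threshold为截断距离
--     des = []
--     for i in matrix:
--         d = [cal_distance(i, v) for v in matrix if v != i]
--         count = 0
--         for x in d:
--             if x < threshold:
--                 count += 1
--         des.append(count)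
--     return des
-- ===== SOURCE B (Python) =====
-- def cal_density(threshold, matrix):
--     # One pass over unordered index pairs, exploiting distance symmetry:
--     # each distance is computed once and credited to both endpoints.
--     n = len(matrix)
--     des = [0] * n
--     for i in range(n):
--         for j in range(i + 1, n):
--             if matrix[i] != matrix[j]:
--                 d = sum((a - b) ** 2 for a, b in zip(matrix[i], matrix[j]))
--                 if d < threshold:
--                     des[i] += 1
--                     des[j] += 1
--     return des
-- ===== Notes on version B (the rewrite author's own statement) =====
-- stated objective: faster
-- what changed: B replaces A's per-point pass (which rebuilds a filtered distance list for every point and rescans it) with a single loop over unordered index pairs i<j, computing each symmetric squared distance once and incrementing a counter array at both endpoints.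
import Mathlib
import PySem

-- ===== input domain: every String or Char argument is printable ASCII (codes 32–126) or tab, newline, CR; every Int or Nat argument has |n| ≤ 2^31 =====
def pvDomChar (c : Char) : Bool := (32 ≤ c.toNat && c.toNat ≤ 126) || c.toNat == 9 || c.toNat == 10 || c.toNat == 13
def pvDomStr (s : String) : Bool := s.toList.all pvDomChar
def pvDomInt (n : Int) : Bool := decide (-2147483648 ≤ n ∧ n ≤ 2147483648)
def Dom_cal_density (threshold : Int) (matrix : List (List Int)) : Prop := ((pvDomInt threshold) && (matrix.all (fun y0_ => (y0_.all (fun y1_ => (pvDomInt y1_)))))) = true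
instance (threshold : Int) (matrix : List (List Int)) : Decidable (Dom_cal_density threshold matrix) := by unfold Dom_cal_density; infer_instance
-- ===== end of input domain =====

-- B counts each symmetric pair distance once over unordered index pairs (one counter array)
-- instead of A's per-point filtered distance list; objective: a constant-factor speedup.
-- A's math.pow works on floats; on Dom the float/int comparison with the threshold never
-- disagrees with exact integer arithmetic, so both ports use Int.

-- ===== PORT A =====
-- sum([math.pow(vec1[i] - vec2[i], 2) for i in range(len(vec1))])
def cal_distance (vec1 vec2 : List Int) : Int :=
  ((PySem.List.pyRange 0 (vec1.length : Int) 1).map (fun i =>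
      ((PySem.List.pyGet? vec1 i).getD 0 - (PySem.List.pyGet? vec2 i).getD 0) ^ 2)).sum

def cal_density (threshold : Int) (matrix : List (List Int)) : List Int :=
  matrix.foldl (fun des i =>
    let d := (matrix.filter (fun v => decide (v ≠ i))).map (fun v => cal_distance i v)
    let count : Int := d.foldl (fun c x => if x < threshold then c + 1 else c) 0
    des ++ [count]) []

-- ===== PORT B =====
-- sum((a - b) ** 2 for a, b in zip(u, v))
def sqdist (u v : List Int) : Int := ((u.zip v).map (fun p => (p.1 - p.2) ^ 2)).sum

-- body of B's inner loop over j
def bstep (threshold : Int) (matrix : List (List Int)) (i : Nat) (des : List Int) (j : Nat) : List Int :=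
  if matrix.getD i [] ≠ matrix.getD j [] then
    if sqdist (matrix.getD i []) (matrix.getD j []) < threshold then
      (des.modify i (· + 1)).modify j (· + 1)
    else des
  else des

def cal_density_alt (threshold : Int) (matrix : List (List Int)) : List Int :=
  let n := matrix.length
  (List.range n).foldl (fun des i =>
      (List.range' (i + 1) (n - (i + 1))).foldl (bstep threshold matrix i) des)
    (List.replicate n 0)

-- ===== PRECONDITION & SPEC =====
-- Pre_ excludes only ragged matrices (two rows of different lengths), on which A raises
-- IndexError inside cal_distance; it admits every input on which A returns.
def Pre_cal_density (threshold : Int) (matrix : List (List Int)) : Prop :=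
  ∀ r ∈ matrix, r.length = (matrix.headD []).length
instance (threshold : Int) (matrix : List (List Int)) : Decidable (Pre_cal_density threshold matrix) := by unfold Pre_cal_density; infer_instance

def pvWitness_cal_density : Int × List (List Int) := (3, [[0, 0], [1, 1], [0, 3]])

def Spec_cal_density (threshold : Int) (matrix : List (List Int)) (out : List Int) : Prop := out = cal_density_alt threshold matrix
instance (threshold : Int) (matrix : List (List Int)) (out : List Int) : Decidable (Spec_cal_density threshold matrix out) := by unfold Spec_cal_density; infer_instance

-- ===== CLAIM (what is proved, stated in full; the proofs are below) =====
def Claim_equal_cal_density : Prop := ∀ (threshold : Int) (matrix : List (List Int)), Dom_cal_density threshold matrix → Pre_cal_density threshold matrix → Spec_cal_density threshold matrix (cal_density threshold matrix)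

-- ===== LEMMAS AND PROOFS =====

-- the row at index m (all indices we use are < matrix.length)
def grow (matrix : List (List Int)) (m : Nat) : List Int := matrix.getD m []

-- the Bool condition B tests for the pair (i, j)
def cB (threshold : Int) (matrix : List (List Int)) (i j : Nat) : Bool :=
  decide (grow matrix i ≠ grow matrix j) && decide (sqdist (grow matrix i) (grow matrix j) < threshold)

lemma mem_range'_iff {s n m : Nat} : m ∈ List.range' s n ↔ s ≤ m ∧ m < s + n := by
  rw [List.mem_range']
  constructor
  · rintro ⟨i, hi, rfl⟩; omega
  · intro h; exact ⟨m - s, by omega, by omega⟩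

lemma grow_mem (matrix : List (List Int)) (m : Nat) (hm : m < matrix.length) :
    grow matrix m ∈ matrix := by
  unfold grow; rw [List.getD_eq_getElem _ _ hm]; exact List.getElem_mem _

lemma bstep_eq (threshold : Int) (matrix : List (List Int)) (i : Nat) (des : List Int) (j : Nat) :
    bstep threshold matrix i des j =
      if cB threshold matrix i j then (des.modify i (· + 1)).modify j (· + 1) else des := by
  unfold bstep cB grow
  split_ifs <;> simp_all
  all_goals omega

lemma bstep_length (threshold : Int) (matrix : List (List Int)) (i : Nat) (des : List Int) (j : Nat) :
    (bstep threshold matrix i des j).length = des.length := by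
  unfold bstep; split_ifs <;> simp

lemma inner_length (threshold : Int) (matrix : List (List Int)) (i : Nat) (l : List Nat) (des : List Int) :
    (l.foldl (bstep threshold matrix i) des).length = des.length := by
  induction l generalizing des with
  | nil => rfl
  | cons j l ih => rw [List.foldl_cons, ih, bstep_length]

lemma modify_getD (l : List Int) (i k : Nat) (hi : i < l.length) :
    (l.modify i (· + 1)).getD k 0 = if i = k then l.getD k 0 + 1 else l.getD k 0 := by
  by_cases hk : k < l.length
  · simp only [List.getD_eq_getElem?_getD, List.getElem?_modify]
    split_ifs <;> simp_all
  · have hik : ¬ i = k := by omega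
    have h1 : l[k]? = none := by rw [List.getElem?_eq_none_iff]; omega
    simp [List.getD_eq_getElem?_getD, List.getElem?_modify, h1, hik]

lemma inner_getD (threshold : Int) (matrix : List (List Int)) (i : Nat) (l : List Nat)
    (des : List Int) (k : Nat) (hi : i < des.length) (hl : ∀ j ∈ l, j < des.length) :
    (l.foldl (bstep threshold matrix i) des).getD k 0
      = des.getD k 0 + (if k = i then (l.countP (cB threshold matrix i) : Int) else 0)
        + (l.countP (fun j => j == k && cB threshold matrix i j) : Int) := by
  induction l generalizing des hi with
  | nil => simp
  | cons j l ih =>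
    have hj : j < des.length := hl j (by simp)
    have hl' : ∀ j' ∈ l, j' < des.length := fun j' h => hl j' (by simp [h])
    rw [List.foldl_cons, bstep_eq]
    by_cases hc : cB threshold matrix i j
    · rw [if_pos hc,
          ih ((des.modify i (· + 1)).modify j (· + 1)) (by simpa using hi)
            (by intro j' h; simpa using hl' j' h),
          modify_getD _ j k (by simpa using hj), modify_getD _ i k hi]
      simp only [List.countP_cons, hc, Bool.and_true]
      by_cases hjk : j = k <;> by_cases hki : k = i <;>
        simp [hjk, hki] <;> push_cast <;> omega
    · rw [if_neg hc, ih des hi hl']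
      simp [List.countP_cons, hc]

lemma countP_eq_mem (l : List Nat) (hnd : l.Nodup) (k : Nat) (p : Nat → Bool) :
    l.countP (fun j => j == k && p j) = if k ∈ l ∧ p k then 1 else 0 := by
  have h1 : l.countP (fun j => j == k && p j) = l.countP (fun j => j == k && p k) := by
    apply List.countP_congr
    intro j hj
    by_cases hjk : j = k
    · subst hjk; simp
    · simp [hjk]
  rw [h1]
  by_cases hp : p k
  · simp only [hp, Bool.and_true]
    have h2 : l.countP (fun j => j == k) = l.count k := by simp [List.count]
    rw [h2]
    by_cases hm : k ∈ l
    · simp [hm, hp, List.count_eq_one_of_mem hnd hm]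
    · simp [hm, hp, List.count_eq_zero.2 hm]
  · simp [hp]

lemma outer_getD (threshold : Int) (matrix : List (List Int)) (L : List Nat) (des : List Int)
    (hdes : des.length = matrix.length) (hL : ∀ i ∈ L, i < matrix.length) (k : Nat) :
    (L.foldl (fun des i => (List.range' (i + 1) (matrix.length - (i + 1))).foldl (bstep threshold matrix i) des) des).getD k 0
      = des.getD k 0 + ((L.map (fun i =>
          (if k = i then ((List.range' (i + 1) (matrix.length - (i + 1))).countP (cB threshold matrix i) : Int) else 0)
          + ((List.range' (i + 1) (matrix.length - (i + 1))).countP (fun j => j == k && cB threshold matrix i j) : Int))).sum) := by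
  induction L generalizing des hdes with
  | nil => simp
  | cons i L ih =>
    have hi : i < matrix.length := hL i (by simp)
    have hL' : ∀ i' ∈ L, i' < matrix.length := fun i' h => hL i' (by simp [h])
    rw [List.foldl_cons,
        ih _ (by rw [inner_length]; exact hdes) hL',
        inner_getD threshold matrix i _ des k (by omega)
          (by intro j hj; have := mem_range'_iff.1 hj; omega)]
    simp only [List.map_cons, List.sum_cons]
    ring

lemma sum_map_add (l : List Nat) (f g : Nat → Int) :
    (l.map (fun i => f i + g i)).sum = (l.map f).sum + (l.map g).sum := by
  induction l with
  | nil => simp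
  | cons x l ih => simp [ih]; ring

lemma sum_if_zero (l : List Nat) (k : Nat) (f : Nat → Int) (hk : k ∉ l) :
    (l.map (fun i => if k = i then f i else 0)).sum = 0 := by
  induction l with
  | nil => simp
  | cons i l ih =>
    simp only [List.mem_cons, not_or] at hk
    simp [hk.1, ih hk.2]

lemma sum_if_single (l : List Nat) (hnd : l.Nodup) (k : Nat) (hk : k ∈ l) (f : Nat → Int) :
    (l.map (fun i => if k = i then f i else 0)).sum = f k := by
  induction l with
  | nil => cases hk
  | cons i l ih =>
    rcases List.mem_cons.1 hk with h | h
    · subst h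
      have hkl : k ∉ l := (List.nodup_cons.1 hnd).1
      simp [sum_if_zero l k f hkl]
    · have hki : ¬ k = i := by rintro rfl; exact (List.nodup_cons.1 hnd).1 h
      simp [hki, ih (List.nodup_cons.1 hnd).2 h]

lemma foldl_count (th : Int) (l : List Int) (c : Int) :
    l.foldl (fun c x => if x < th then c + 1 else c) c = c + (l.countP (fun x => decide (x < th)) : Int) := by
  induction l generalizing c with
  | nil => simp
  | cons x l ih =>
    rw [List.foldl_cons]
    by_cases h : x < th <;> simp [h, ih, List.countP_cons] <;> push_cast <;> ring

lemma foldl_append_map {α β : Type} (F : α → β) (l : List α) (acc : List β)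
    (f : List β → α → List β) (hf : ∀ acc x, f acc x = acc ++ [F x]) :
    l.foldl f acc = acc ++ l.map F := by
  induction l generalizing acc with
  | nil => simp
  | cons x l ih => rw [List.foldl_cons, hf, ih]; simp

lemma A_eq_map (th : Int) (matrix : List (List Int)) :
    cal_density th matrix = matrix.map (fun u =>
      (((matrix.filter (fun v => decide (v ≠ u))).countP (fun v => decide (cal_distance u v < th)) : Nat) : Int)) := by
  unfold cal_density
  rw [foldl_append_map (fun u =>
      (((matrix.filter (fun v => decide (v ≠ u))).countP (fun v => decide (cal_distance u v < th)) : Nat) : Int))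
      matrix []]
  · simp
  · intro acc u
    show acc ++ [((matrix.filter (fun v => decide (v ≠ u))).map (fun v => cal_distance u v)).foldl
        (fun c x => if x < th then c + 1 else c) 0] = _
    rw [foldl_count, List.countP_map]
    simp only [zero_add]
    rfl

lemma matrix_eq_map_range (l : List (List Int)) :
    (List.range l.length).map (fun m => l.getD m []) = l := by
  apply List.ext_getElem
  · simp
  · intro i h1 h2
    simp only [List.getElem_map, List.getElem_range]
    exact List.getD_eq_getElem l [] h2

lemma sqdist_comm (u v : List Int) (h : u.length = v.length) : sqdist u v = sqdist v u := by
  induction u generalizing v with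
  | nil =>
    cases v with
    | nil => rfl
    | cons b v => simp at h
  | cons a u ih =>
    cases v with
    | nil => simp at h
    | cons b v =>
      simp only [sqdist, List.zip_cons_cons, List.map_cons, List.sum_cons]
      have h2 := ih v (by simpa using h)
      simp only [sqdist] at h2
      rw [h2]; ring

lemma range_sq (u v : List Int) (h : u.length = v.length) :
    ((List.range u.length).map (fun k => ((u[k]?).getD 0 - (v[k]?).getD 0) ^ 2)).sum = sqdist u v := by
  induction u generalizing v with
  | nil =>
    cases v with
    | nil => simp [sqdist]
    | cons b v => simp at h
  | cons a u ih =>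
    cases v with
    | nil => simp at h
    | cons b v =>
      simp only [List.length_cons, List.range_succ_eq_map, List.map_cons, List.map_map,
        Function.comp_def, List.sum_cons]
      rw [show ((List.range u.length).map fun k => (((a :: u)[Nat.succ k]?).getD 0 - ((b :: v)[Nat.succ k]?).getD 0) ^ 2)
            = (List.range u.length).map fun k => ((u[k]?).getD 0 - (v[k]?).getD 0) ^ 2 from
          List.map_congr_left (fun k _ => by simp)]
      rw [ih v (by simpa using h)]
      simp [sqdist, List.zip_cons_cons]

lemma cal_distance_eq_sqdist (u v : List Int) (h : u.length = v.length) : cal_distance u v = sqdist u v := by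
  unfold cal_distance
  rw [PySem.List.pyRange_one]
  simp only [List.map_map, Function.comp_def, zero_add, PySem.List.pyGet?_natCast]
  have hlen : (((u.length : Int)) - 0).toNat = u.length := by simp
  rw [hlen, range_sq u v h]

lemma cB_self (th : Int) (matrix : List (List Int)) (k : Nat) : cB th matrix k k = false := by
  simp [cB]

lemma cB_symm (th : Int) (matrix : List (List Int)) (hPre : Pre_cal_density th matrix)
    (m k : Nat) (hm : m < matrix.length) (hk : k < matrix.length) :
    cB th matrix m k = cB th matrix k m := by
  have hlen : (grow matrix m).length = (grow matrix k).length := by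
    rw [hPre _ (grow_mem matrix m hm), hPre _ (grow_mem matrix k hk)]
  simp only [cB]
  rw [sqdist_comm _ _ hlen]
  have hne : decide (grow matrix m ≠ grow matrix k) = decide (grow matrix k ≠ grow matrix m) := by
    rw [decide_eq_decide]; exact ne_comm
  rw [hne]

lemma A_count (th : Int) (matrix : List (List Int)) (hPre : Pre_cal_density th matrix)
    (k : Nat) (hk : k < matrix.length) :
    (cal_density th matrix).getD k 0 = (((List.range matrix.length).countP (fun m => cB th matrix m k) : Nat) : Int) := by
  have hgk : matrix[k] = matrix.getD k [] := (List.getD_eq_getElem _ _ hk).symm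
  rw [A_eq_map, List.getD_eq_getElem _ _ (by simpa using hk), List.getElem_map, hgk]
  norm_cast
  rw [List.countP_filter]
  obtain ⟨u, hu⟩ : ∃ u, matrix.getD k [] = u := ⟨_, rfl⟩
  rw [hu]
  conv_lhs => rw [← matrix_eq_map_range matrix]
  rw [List.countP_map]
  apply List.countP_congr
  intro m hm
  have hm' : m < matrix.length := List.mem_range.1 hm
  have hmem : ∀ j, j < matrix.length → matrix.getD j [] ∈ matrix := by
    intro j hj; rw [List.getD_eq_getElem _ _ hj]; exact List.getElem_mem _
  have hlen : u.length = (matrix.getD m []).length := by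
    rw [← hu, hPre _ (hmem k hk), hPre _ (hmem m hm')]
  have h1 : cal_distance u (matrix.getD m []) = sqdist (matrix.getD m []) u := by
    rw [cal_distance_eq_sqdist _ _ hlen, sqdist_comm _ _ hlen]
  simp only [Function.comp_def, cB, grow, hu, Bool.and_eq_true, decide_eq_true_eq, h1]
  tauto

lemma countP_disj (l : List Nat) (p q : Nat → Bool) (h : ∀ x ∈ l, ¬(p x = true ∧ q x = true)) :
    l.countP (fun x => p x || q x) = l.countP p + l.countP q := by
  induction l with
  | nil => simp
  | cons x l ih =>
    simp only [List.countP_cons, ih (fun y hy => h y (List.mem_cons_of_mem _ hy))]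
    have hx := h x (by simp)
    by_cases hp : p x <;> by_cases hq : q x <;> simp_all <;> omega

lemma range_split (k n : Nat) (hk : k < n) :
    List.range n = List.range' 0 (k + 1) ++ List.range' (k + 1) (n - (k + 1)) := by
  rw [List.range_eq_range']
  have h := List.range'_append (s := 0) (m := k + 1) (n := n - (k + 1)) (step := 1)
  have h2 : (0 : Nat) + 1 * (k + 1) = k + 1 := by omega
  have h3 : k + 1 + (n - (k + 1)) = n := by omega
  rw [h2, h3] at h
  exact h.symm

lemma alt_length (th : Int) (matrix : List (List Int)) :
    (cal_density_alt th matrix).length = matrix.length := by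
  have h : ∀ (L : List Nat) (des : List Int),
      (L.foldl (fun des i => (List.range' (i + 1) (matrix.length - (i + 1))).foldl (bstep th matrix i) des) des).length = des.length := by
    intro L
    induction L with
    | nil => intro des; rfl
    | cons i L ih => intro des; rw [List.foldl_cons, ih, inner_length]
  simp only [cal_density_alt]
  rw [h, List.length_replicate]

lemma B_entry (th : Int) (matrix : List (List Int)) (k : Nat) (hk : k < matrix.length) :
    (cal_density_alt th matrix).getD k 0 =
      (((List.range' (k + 1) (matrix.length - (k + 1))).countP (cB th matrix k) : Nat) : Int)
      + (((List.range matrix.length).countP (fun i => decide (i < k) && cB th matrix i k) : Nat) : Int) := by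
  simp only [cal_density_alt]
  rw [outer_getD th matrix (List.range matrix.length) _ (by simp) (fun i h => List.mem_range.1 h) k]
  have hrep : (List.replicate matrix.length (0 : Int)).getD k 0 = 0 := by
    rw [List.getD_eq_getElem _ _ (by simpa using hk)]; simp
  rw [hrep, sum_map_add]
  have hS1 : ((List.range matrix.length).map (fun i =>
      if k = i then ((List.range' (i + 1) (matrix.length - (i + 1))).countP (cB th matrix i) : Int) else 0)).sum
      = ((List.range' (k + 1) (matrix.length - (k + 1))).countP (cB th matrix k) : Int) := by
    exact sum_if_single _ (List.nodup_range) k (List.mem_range.2 hk) _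
  have hS2 : ((List.range matrix.length).map (fun i =>
      (((List.range' (i + 1) (matrix.length - (i + 1))).countP (fun j => j == k && cB th matrix i j) : Nat) : Int))).sum
      = (((List.range matrix.length).countP (fun i => decide (i < k) && cB th matrix i k) : Nat) : Int) := by
    have h2 : ∀ i ∈ List.range matrix.length,
        (((List.range' (i + 1) (matrix.length - (i + 1))).countP (fun j => j == k && cB th matrix i j) : Nat) : Int)
          = if (decide (i < k) && cB th matrix i k) = true then 1 else 0 := by
      intro i hi
      have hi' := List.mem_range.1 hi
      rw [countP_eq_mem _ (List.nodup_range' 1) k (cB th matrix i)]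
      by_cases hc : cB th matrix i k
      · by_cases hik : i < k
        · have hmem : k ∈ List.range' (i + 1) (matrix.length - (i + 1)) :=
            mem_range'_iff.2 ⟨by omega, by omega⟩
          simp [hmem, hc, hik]
        · have hmem : k ∉ List.range' (i + 1) (matrix.length - (i + 1)) := by
            intro hm; have := mem_range'_iff.1 hm; omega
          simp [hmem, hc, hik]
      · simp [hc]
    rw [List.map_congr_left h2, PySem.List.sum_map_ite_one_zero]
  rw [hS1, hS2]
  ring

lemma A_split (th : Int) (matrix : List (List Int)) (k : Nat) (hk : k < matrix.length) :
    (List.range matrix.length).countP (fun m => cB th matrix m k)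
      = (List.range matrix.length).countP (fun m => decide (m < k) && cB th matrix m k)
        + (List.range matrix.length).countP (fun m => decide (k < m) && cB th matrix m k) := by
  rw [← countP_disj _ _ _ (by
    intro m hm
    rintro ⟨h1, h2⟩
    simp only [Bool.and_eq_true, decide_eq_true_eq] at h1 h2
    omega)]
  apply List.countP_congr
  intro m hm
  by_cases hc : cB th matrix m k
  · by_cases hmk : m = k
    · subst hmk
      rw [cB_self] at hc
      exact absurd hc (by simp)
    · have hlt : m < k ∨ k < m := by omega
      rcases hlt with h | h <;> simp [hc, h]
  · simp [hc]

lemma A_gt_part (th : Int) (matrix : List (List Int)) (hPre : Pre_cal_density th matrix)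
    (k : Nat) (hk : k < matrix.length) :
    (List.range matrix.length).countP (fun m => decide (k < m) && cB th matrix m k)
      = (List.range' (k + 1) (matrix.length - (k + 1))).countP (cB th matrix k) := by
  rw [range_split k matrix.length hk, List.countP_append]
  have hz : (List.range' 0 (k + 1)).countP (fun m => decide (k < m) && cB th matrix m k) = 0 := by
    rw [List.countP_eq_zero]
    intro m hm
    have := mem_range'_iff.1 hm
    simp only [Bool.and_eq_true, decide_eq_true_eq, not_and]
    intro hkm
    omega
  rw [hz, Nat.zero_add]
  apply List.countP_congr
  intro m hm
  have hmr := mem_range'_iff.1 hm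
  have hm' : m < matrix.length := by omega
  rw [cB_symm th matrix hPre m k hm' hk]
  simp only [Bool.and_eq_true, decide_eq_true_eq]
  constructor
  · rintro ⟨_, h⟩; exact h
  · intro h; exact ⟨by omega, h⟩

-- ===== VERDICT (by name: the statement is the Claim_ definition above) =====
theorem cal_density_spec : Claim_equal_cal_density := by
  intro th matrix _hDom hPre
  unfold Spec_cal_density
  apply List.ext_getElem
  · rw [A_eq_map, alt_length]; simp
  · intro k h1 h2
    have hk : k < matrix.length := by rw [alt_length] at h2; exact h2
    rw [← List.getD_eq_getElem _ 0 h1, ← List.getD_eq_getElem _ 0 h2]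
    rw [A_count th matrix hPre k hk, B_entry th matrix k hk]
    rw [A_split th matrix k hk, A_gt_part th matrix hPre k hk]
    push_cast
    ring
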